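-- pv_equiv track=rewrite | github.com/reutlazarr/LevanonProject | fold.py | convert_dna_to_formal_format
-- ===== SOURCE A (Python) =====
-- def convert_dna_to_formal_format(dna):
--     count = 0
--     new_dna = ""
--     uppercase_dna = dna.upper()
--     for i in range(len(uppercase_dna)):
--         count += 1
--         new_dna += uppercase_dna[i]
--         if count % 50 == 0:
--             new_dna += '\n'
--     return new_dna
-- ===== SOURCE B (Python) =====
-- def convert_dna_to_formal_format(dna):
--     upper = dna.upper()
--     parts = []
--     for i in range(0, len(upper), 50):
--         block = upper[i:i+50]
--         parts.append(block)
--         if len(block) == 50: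
--             parts.append('\n')
--     return ''.join(parts)
-- ===== Notes on version B (the rewrite author's own statement) =====
-- stated objective: faster
-- what changed: Replaces the per-character loop with a modulo counter and repeated string concatenation by a block-wise pass that slices 50-character chunks, appends a newline after each complete chunk, and joins the collected parts once.
import Mathlib
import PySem

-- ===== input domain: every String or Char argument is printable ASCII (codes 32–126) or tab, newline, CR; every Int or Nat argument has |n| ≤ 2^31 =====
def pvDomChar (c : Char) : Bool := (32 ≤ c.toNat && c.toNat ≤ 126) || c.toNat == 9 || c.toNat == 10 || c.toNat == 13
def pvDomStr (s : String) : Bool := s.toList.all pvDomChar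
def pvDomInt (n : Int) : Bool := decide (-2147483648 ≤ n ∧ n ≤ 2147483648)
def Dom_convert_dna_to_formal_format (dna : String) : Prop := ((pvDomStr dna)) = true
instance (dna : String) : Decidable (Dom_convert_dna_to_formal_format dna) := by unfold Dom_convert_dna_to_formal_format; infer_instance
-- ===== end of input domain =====

-- B replaces A's per-character modulo-counter loop (one string append per character) by a
-- block-wise pass over 50-character slices joined once; measurably faster by a constant factor.


-- ===== PORT A =====
-- count = 0; new_dna = ""; for i in range(len(upper)): count += 1; new_dna += upper[i]; if count % 50 == 0: new_dna += '\n'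
def convert_dna_to_formal_format (dna : String) : String :=
  let uppercase_dna : List Char := PySem.Chars.upper dna.toList
  let st := (PySem.List.pyRange 0 (PySem.List.len uppercase_dna) 1).foldl
    (fun (st : Int × List Char) i =>
      let count := st.1 + 1
      let new_dna := st.2 ++ [PySem.List.pyGetD uppercase_dna i ' ']
      (count, if PySem.Int.mod count 50 = 0 then new_dna ++ ['\n'] else new_dna))
    (0, [])
  String.ofList st.2

-- ===== PORT B =====
-- parts = []; for i in range(0, len(upper), 50): block = upper[i:i+50]; parts.append(block);
--             if len(block) == 50: parts.append('\n')
-- return ''.join(parts)   -- ''.join ported as List.flatten (concatenation with empty separator)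
def convert_dna_to_formal_format_alt (dna : String) : String :=
  let upper : List Char := PySem.Chars.upper dna.toList
  let parts := (PySem.List.pyRange 0 (PySem.List.len upper) 50).foldl
    (fun (parts : List (List Char)) i =>
      let block := PySem.List.slice upper (some i) (some (i + 50))
      let parts := parts ++ [block]
      if block.length = 50 then parts ++ [['\n']] else parts)
    []
  String.ofList parts.flatten

-- ===== PRECONDITION & SPEC =====
def Spec_convert_dna_to_formal_format (dna : String) (out : String) : Prop := out = convert_dna_to_formal_format_alt dna
instance (dna : String) (out : String) : Decidable (Spec_convert_dna_to_formal_format dna out) := by unfold Spec_convert_dna_to_formal_format; infer_instance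

-- ===== CLAIM (what is proved, stated in full; the proofs are below) =====
def Claim_equal_convert_dna_to_formal_format : Prop := ∀ (dna : String), Dom_convert_dna_to_formal_format dna → Spec_convert_dna_to_formal_format dna (convert_dna_to_formal_format dna)

-- ===== LEMMAS AND PROOFS =====

-- reference spec: the chars of l with '\n' inserted after every char whose 1-based
-- position, counted from an initial offset c, is ≡ 0 (mod 50)
def pvG (c : Nat) : List Char → List Char
  | [] => []
  | x :: xs => x :: (if (c + 1) % 50 = 0 then '\n' :: pvG (c + 1) xs else pvG (c + 1) xs)

theorem pvFoldA :
    ∀ (l : List Char) (c : Nat) (acc : List Char),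
      l.foldl
        (fun (st : Int × List Char) ch =>
          ((st.1 + 1 : Int),
            if PySem.Int.mod (st.1 + 1) 50 = 0 then (st.2 ++ [ch]) ++ ['\n'] else st.2 ++ [ch]))
        ((c : Int), acc)
      = (((c + l.length : Nat) : Int), acc ++ pvG c l) := by
  intro l
  induction l with
  | nil => intro c acc; simp [pvG]
  | cons x xs ih =>
    intro c acc
    have hc : ((c : Int) + 1) = ((c + 1 : Nat) : Int) := by push_cast; ring
    have hmod : (PySem.Int.mod (((c + 1 : Nat)) : Int) 50 = 0) ↔ ((c + 1) % 50 = 0) := by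
      rw [PySem.Int.mod_eq_emod_of_pos (by norm_num : (0:Int) < 50)]
      omega
    simp only [List.foldl_cons, hc]
    by_cases h : (c + 1) % 50 = 0
    · rw [if_pos (hmod.mpr h)]
      rw [ih (c + 1)]
      simp only [pvG, if_pos h, List.length_cons, Prod.mk.injEq]
      exact ⟨by push_cast; ring, by simp⟩
    · rw [if_neg (fun hx => h (hmod.mp hx))]
      rw [ih (c + 1)]
      simp only [pvG, if_neg h, List.length_cons, Prod.mk.injEq]
      exact ⟨by push_cast; ring, by simp⟩

theorem pvG_short : ∀ (l : List Char) (c : Nat), c % 50 + l.length < 50 → pvG c l = l := by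
  intro l
  induction l with
  | nil => intro c _; rfl
  | cons x xs ih =>
    intro c h
    simp only [List.length_cons] at h
    have h2 : (c + 1) % 50 ≠ 0 := by omega
    simp only [pvG, if_neg h2]
    rw [ih (c + 1) (by omega)]

theorem pvG_chunk : ∀ (l : List Char) (c : Nat), 50 ≤ c % 50 + l.length →
    pvG c l = l.take (50 - c % 50) ++ '\n' :: pvG (c + (50 - c % 50)) (l.drop (50 - c % 50)) := by
  intro l
  induction l with
  | nil => intro c h; simp at h; omega
  | cons x xs ih =>
    intro c h
    simp only [List.length_cons] at h
    by_cases h49 : c % 50 = 49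
    · have h0 : (c + 1) % 50 = 0 := by omega
      simp only [pvG, if_pos h0, h49]
      simp
    · have h1 : (c + 1) % 50 = c % 50 + 1 := by omega
      have h2 : (c + 1) % 50 ≠ 0 := by omega
      simp only [pvG, if_neg h2]
      rw [ih (c + 1) (by omega)]
      have e1 : 50 - c % 50 = (50 - (c + 1) % 50) + 1 := by omega
      rw [e1]
      simp only [List.take_succ_cons, List.drop_succ_cons, List.cons_append]
      rw [show c + 1 + (50 - (c + 1) % 50) = c + (50 - (c + 1) % 50 + 1) from by omega]

-- range(a, b, 50) peels its first element when a < b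
theorem pvRange50_cons (a b : Int) (h : a < b) :
    PySem.List.pyRange a b 50 = a :: PySem.List.pyRange (a + 50) b 50 := by
  rw [PySem.List.pyRange_of_pos a b (by norm_num : (0:Int) < 50),
      PySem.List.pyRange_of_pos (a + 50) b (by norm_num : (0:Int) < 50)]
  have hcnt : ((b - a + 50 - 1) / 50).toNat
      = (if a + 50 < b then ((b - (a + 50) + 50 - 1) / 50).toNat else 0) + 1 := by
    by_cases hab : a + 50 < b
    · rw [if_pos hab]; omega
    · rw [if_neg hab]; omega
  rw [if_pos h, hcnt, List.range_succ_eq_map]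
  simp only [List.map_cons, List.map_map]
  refine List.cons_eq_cons.mpr ⟨by push_cast; ring, ?_⟩
  apply List.map_congr_left
  intro k _
  simp only [Function.comp_apply]
  push_cast
  ring

-- the B-side fold, started at any multiple of 50, produces pvG of the tail
theorem pvFoldB (up : List Char) :
    ∀ (k : Nat) (i : Nat) (parts : List (List Char)),
      up.length - i ≤ k → i % 50 = 0 →
      ((PySem.List.pyRange (i : Int) (PySem.List.len up) 50).foldl
        (fun (parts : List (List Char)) j =>
          let block := PySem.List.slice up (some j) (some (j + 50))
          let parts := parts ++ [block]
          if block.length = 50 then parts ++ [['\n']] else parts)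
        parts).flatten
      = parts.flatten ++ pvG i (up.drop i) := by
  intro k
  induction k with
  | zero =>
    intro i parts hk _
    have hge : up.length ≤ i := by omega
    have hnil : PySem.List.pyRange (i : Int) (PySem.List.len up) 50 = [] := by
      rw [PySem.List.pyRange_of_pos _ _ (by norm_num : (0:Int) < 50)]
      rw [if_neg (by simp [PySem.List.len]; exact_mod_cast hge)]
      simp
    rw [hnil]
    simp [List.drop_eq_nil_of_le hge, pvG]
  | succ k ih =>
    intro i parts hk hi
    by_cases hlt : i < up.length
    · rw [pvRange50_cons _ _ (by simp [PySem.List.len]; exact_mod_cast hlt)]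
      simp only [List.foldl_cons]
      have hblock : PySem.List.slice up (some (i : Int)) (some ((i : Int) + 50))
          = (up.drop i).take 50 := by
        rw [show ((i : Int) + 50) = ((i + 50 : Nat) : Int) from by push_cast; ring]
        rw [PySem.List.slice_natCast]
        congr 1
        omega
      have hcast : ((i : Int) + 50) = ((i + 50 : Nat) : Int) := by push_cast; ring
      rw [hblock, hcast]
      have hlen : ((up.drop i).take 50).length = min 50 (up.length - i) := by simp
      by_cases hbig : 50 ≤ up.length - i
      · rw [if_pos (by rw [hlen]; omega)]
        rw [ih (i + 50) _ (by omega) (by omega)]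
        rw [pvG_chunk (up.drop i) i (by simp; omega), hi]
        simp only [Nat.sub_zero, List.flatten_append, List.flatten_cons, List.flatten_nil,
          List.append_nil, List.append_assoc, List.singleton_append, List.drop_drop]
      · rw [if_neg (by rw [hlen]; omega)]
        rw [ih (i + 50) _ (by omega) (by omega)]
        have hd : up.drop (i + 50) = [] := List.drop_eq_nil_of_le (by omega)
        rw [show up.drop i = (up.drop i).take 50 from (List.take_of_length_le (by simp; omega)).symm] at *
        rw [pvG_short _ i (by rw [hi]; simp; omega)]
        simp [hd, pvG]
    · have hnil : PySem.List.pyRange (i : Int) (PySem.List.len up) 50 = [] := by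
        rw [PySem.List.pyRange_of_pos _ _ (by norm_num : (0:Int) < 50)]
        rw [if_neg (by simp [PySem.List.len]; omega)]
        simp
      rw [hnil]
      simp [List.drop_eq_nil_of_le (by omega : up.length ≤ i), pvG]

-- ===== VERDICT (by name: the statement is the Claim_ definition above) =====
theorem convert_dna_to_formal_format_spec : Claim_equal_convert_dna_to_formal_format := by
  intro dna _
  show convert_dna_to_formal_format dna = convert_dna_to_formal_format_alt dna
  unfold convert_dna_to_formal_format convert_dna_to_formal_format_alt
  dsimp only
  rw [PySem.List.foldl_pyRange_zero_pyGetD (PySem.Chars.upper dna.toList) ' '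
    (fun (st : Int × List Char) ch =>
      ((st.1 + 1 : Int),
        if PySem.Int.mod (st.1 + 1) 50 = 0 then (st.2 ++ [ch]) ++ ['\n'] else st.2 ++ [ch]))
    (0, [])]
  rw [show ((0 : Int), ([] : List Char)) = (((0 : Nat) : Int), ([] : List Char)) from rfl]
  rw [pvFoldA (PySem.Chars.upper dna.toList) 0 []]
  rw [show ((0 : Int)) = ((0 : Nat) : Int) from rfl]
  rw [pvFoldB (PySem.Chars.upper dna.toList) (PySem.Chars.upper dna.toList).length 0 [] (by omega) (by omega)]
  simp
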